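-- pv_equiv track=rewrite | github.com/devdavcor/calculadora_IP | main.py | subnet_jump
-- ===== SOURCE A (Python) =====
-- def subnet_jump(network_mask_info, new_mask_bits):
--     # 1 - first octet, 2 - second octet, 3 - third octet, 4 - fourth octet
--     # 5 - network mask number of bits, 6 - new number of bits for mask, 7 - jumps for subtnet
--     bits_add = new_mask_bits - network_mask_info
--     if bits_add == 1:
--         subnet_jumps = 2 ** 7
--     else:
--         subnet_jumps = 0
--         for i in range(bits_add):
--             subnet_jumps += 2 ** (7-i)
--     return subnet_jumps
-- ===== SOURCE B (Python) =====
-- def subnet_jump(network_mask_info, new_mask_bits):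
--     bits_add = new_mask_bits - network_mask_info
--     if bits_add <= 0:
--         return 0
--     return 256 - (256 >> bits_add)
-- ===== Notes on version B (the rewrite author's own statement) =====
-- stated objective: simpler
-- what changed: Replaces the per-bit summation loop (and the redundant bits_add==1 special case) with the geometric-sum closed form 256 - (256 >> bits_add), guarded by bits_add <= 0 for the empty loop.
-- outside the precondition, e.g. on subnet_jump(0, 9): A returns 255.5, B returns 256
import Mathlib
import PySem

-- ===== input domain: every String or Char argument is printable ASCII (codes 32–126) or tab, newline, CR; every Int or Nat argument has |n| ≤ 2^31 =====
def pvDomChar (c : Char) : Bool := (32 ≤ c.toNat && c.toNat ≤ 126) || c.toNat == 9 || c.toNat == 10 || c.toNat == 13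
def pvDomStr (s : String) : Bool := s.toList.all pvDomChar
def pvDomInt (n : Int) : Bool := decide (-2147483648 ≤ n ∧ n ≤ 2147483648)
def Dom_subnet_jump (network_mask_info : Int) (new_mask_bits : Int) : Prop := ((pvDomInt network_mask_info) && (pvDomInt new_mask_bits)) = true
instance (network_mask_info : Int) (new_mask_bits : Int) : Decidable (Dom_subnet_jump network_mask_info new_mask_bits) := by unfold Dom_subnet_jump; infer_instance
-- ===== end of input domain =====

-- B replaces the per-bit summation loop with the closed form 256 - (256 >> bits_add); equivalence on mask differences ≤ 8.


-- ===== PORT A =====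
def subnet_jump (network_mask_info : Int) (new_mask_bits : Int) : Int :=
  let bits_add := new_mask_bits - network_mask_info
  if bits_add = 1 then 2 ^ 7
  else
    -- for i in range(bits_add): subnet_jumps += 2 ** (7 - i)
    -- exact inside Pre_ (bits_add ≤ 8, so every exponent 7 - i is ≥ 0; beyond that Python's 2**(7-i) is a float)
    (PySem.List.pyRange 0 bits_add 1).foldl (fun s i => s + 2 ^ (7 - i).toNat) 0

-- ===== PORT B =====
def subnet_jump_alt (network_mask_info : Int) (new_mask_bits : Int) : Int :=
  let bits_add := new_mask_bits - network_mask_info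
  if bits_add ≤ 0 then 0
  else 256 - ((256 >>> bits_add.toNat : Nat) : Int)

-- ===== PRECONDITION & SPEC =====
-- Pre_ excludes bits differences greater than 8, on which A's loop adds fractional powers and returns a float, not an int.
def Pre_subnet_jump (network_mask_info : Int) (new_mask_bits : Int) : Prop :=
  new_mask_bits - network_mask_info ≤ 8
instance (network_mask_info : Int) (new_mask_bits : Int) : Decidable (Pre_subnet_jump network_mask_info new_mask_bits) := by unfold Pre_subnet_jump; infer_instance
def pvWitness_subnet_jump : Int × Int := (24, 26)

def Spec_subnet_jump (network_mask_info : Int) (new_mask_bits : Int) (out : Int) : Prop := out = subnet_jump_alt network_mask_info new_mask_bits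
instance (network_mask_info : Int) (new_mask_bits : Int) (out : Int) : Decidable (Spec_subnet_jump network_mask_info new_mask_bits out) := by unfold Spec_subnet_jump; infer_instance

-- ===== CLAIM (what is proved, stated in full; the proofs are below) =====
def Claim_equal_subnet_jump : Prop := ∀ (network_mask_info : Int) (new_mask_bits : Int), Dom_subnet_jump network_mask_info new_mask_bits → Pre_subnet_jump network_mask_info new_mask_bits → Spec_subnet_jump network_mask_info new_mask_bits (subnet_jump network_mask_info new_mask_bits)

-- ===== LEMMAS AND PROOFS =====

-- the computation of both ports as a function of the single quantity bits_add = new_mask_bits - network_mask_info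
theorem key (d : Int) (h : d ≤ 8) :
    (if d = 1 then (2:Int) ^ 7
     else (PySem.List.pyRange 0 d 1).foldl (fun s i => s + 2 ^ (7 - i).toNat) 0)
    = ((if d ≤ 0 then 0 else 256 - Int.ofNat (256 >>> d.toNat)) : Int) := by
  by_cases hd : d ≤ 0
  · rw [PySem.List.pyRange_one_eq_nil hd]
    rw [if_neg (show ¬ d = 1 by omega), if_pos hd]
    rfl
  · have h1 : 1 ≤ d := by omega
    interval_cases d <;> decide

-- ===== VERDICT (by name: the statement is the Claim_ definition above) =====
theorem subnet_jump_spec : Claim_equal_subnet_jump := by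
  intro m n _ hpre
  unfold Spec_subnet_jump subnet_jump subnet_jump_alt
  exact key (n - m) hpre
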